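-- pv_equiv track=rewrite | github.com/edjah/Euler | problems/p160.py | alternative
-- ===== SOURCE A (Python) =====
-- def alternative(n):
--     c = 1
--     for i in range(1, n + 1):
--         c *= i
--         if i % 5 == 0:
--             while i % 5 == 0:
--                 c //= 10
--                 i //= 5
--
--     return c % (10 ** 5)
-- ===== SOURCE B (Python) =====
-- def alternative(n):
--     f = 1
--     for i in range(2, n + 1):
--         f *= i
--     z = 0
--     p = 5
--     while p <= n:
--         z += n // p
--         p *= 5
--     return (f // 10 ** z) % 100000
-- ===== Notes on version B (the rewrite author's own statement) =====
-- stated objective: simpler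
-- what changed: B replaces A's interleaved stripping of a factor 10 at every multiple of 5 inside the factorial loop by a plain factorial product, a Legendre-style closed-form count z of the factors of 5 in n!, and one final exact division by 10**z.
import Mathlib
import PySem

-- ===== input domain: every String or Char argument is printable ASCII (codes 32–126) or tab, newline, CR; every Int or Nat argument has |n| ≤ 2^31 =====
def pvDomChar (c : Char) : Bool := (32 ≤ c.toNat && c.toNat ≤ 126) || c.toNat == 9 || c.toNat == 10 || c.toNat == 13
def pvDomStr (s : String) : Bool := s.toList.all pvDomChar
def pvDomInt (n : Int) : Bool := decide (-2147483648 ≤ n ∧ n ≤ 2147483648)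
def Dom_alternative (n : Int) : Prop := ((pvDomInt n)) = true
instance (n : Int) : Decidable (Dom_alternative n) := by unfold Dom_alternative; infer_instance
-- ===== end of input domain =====

-- B computes the same value by a plain factorial product, a closed-form (Legendre-style) count of the
-- factors of 5 in n!, and one final exact division by 10^z — instead of A's per-multiple-of-5 stripping
-- interleaved with the factorial loop (objective: simpler decomposition; not measured faster).

-- ===== PORT A =====
-- inner 'while i % 5 == 0: c //= 10; i //= 5' of A ('0 < i' is only a totality guard: the loop is
-- entered with i ≥ 1, where the Python loop terminates exactly when Lean's does)
def pvStrip (i c : Int) : Int :=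
  if h : PySem.Int.mod i 5 = 0 ∧ 0 < i then
    pvStrip (PySem.Int.floordiv i 5) (PySem.Int.floordiv c 10)
  else c
termination_by i.toNat
decreasing_by
  rw [PySem.Int.floordiv_eq_ediv_of_pos (by norm_num)]
  have h5 : i % 5 = 0 := by
    have := h.1
    rwa [PySem.Int.mod_eq_emod_of_pos (by norm_num)] at this
  have := h.2
  omega

def alternative (n : Int) : Int :=
  let c := (PySem.List.pyRange 1 (n + 1) 1).foldl
    (fun c i =>
      let c := c * i
      if PySem.Int.mod i 5 = 0 then pvStrip i c else c) 1
  PySem.Int.mod c (10 ^ 5)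

-- ===== PORT B =====
-- 'while p <= n: z += n // p; p *= 5' of B ('0 < p' is only a totality guard: p starts at 5 and grows)
def pvZLoop (n p z : Int) : Int :=
  if h : p ≤ n ∧ 0 < p then pvZLoop n (p * 5) (z + PySem.Int.floordiv n p) else z
termination_by (n + 1 - p).toNat
decreasing_by
  have h1 := h.1
  have h2 := h.2
  omega

-- 'f // 10 ** z' : z is always ≥ 0, so 10 ** z is ported as (10 : Int) ^ z.toNat (exact there)
def alternative_alt (n : Int) : Int :=
  let f := (PySem.List.pyRange 2 (n + 1) 1).foldl (fun f i => f * i) 1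
  let z := pvZLoop n 5 0
  PySem.Int.mod (PySem.Int.floordiv f ((10 : Int) ^ z.toNat)) 100000

-- ===== PRECONDITION & SPEC =====
def Spec_alternative (n : Int) (out : Int) : Prop := out = alternative_alt n
instance (n : Int) (out : Int) : Decidable (Spec_alternative n out) := by unfold Spec_alternative; infer_instance

-- ===== CLAIM (what is proved, stated in full; the proofs are below) =====
def Claim_equal_alternative : Prop := ∀ (n : Int), Dom_alternative n → Spec_alternative n (alternative n)


-- ===== LEMMAS AND PROOFS =====

-- the number of factors of 5 in m!
def pvV (m : Nat) : Nat := padicValNat 5 m.factorial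

theorem pv_fact5 : Fact (Nat.Prime 5) := ⟨by norm_num⟩

-- m! has at least as many factors of 2 as factors of 5
theorem pvV_le_v2 (m : Nat) : pvV m ≤ padicValNat 2 m.factorial := by
  haveI := pv_fact5
  unfold pvV
  rw [padicValNat_factorial (b := Nat.log 2 m + 1)
      (lt_of_le_of_lt (Nat.log_anti_left (by norm_num) (by norm_num)) (Nat.lt_succ_self _)),
    padicValNat_factorial (b := Nat.log 2 m + 1) (Nat.lt_succ_self _)]
  exact Finset.sum_le_sum fun i _ => Nat.div_le_div_left (Nat.pow_le_pow_left (by norm_num) i) (by positivity)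

theorem pv_dvd10 (m : Nat) : 10 ^ pvV m ∣ m.factorial := by
  haveI := pv_fact5
  have h5 : 5 ^ pvV m ∣ m.factorial := pow_padicValNat_dvd
  have h2 : 2 ^ pvV m ∣ m.factorial :=
    dvd_trans (pow_dvd_pow 2 (pvV_le_v2 m)) pow_padicValNat_dvd
  have hc : Nat.Coprime (2 ^ pvV m) (5 ^ pvV m) := Nat.Coprime.pow _ _ (by norm_num)
  have : (2 ^ pvV m) * (5 ^ pvV m) ∣ m.factorial :=
    Nat.Coprime.mul_dvd_of_dvd_of_dvd hc h2 h5
  simpa [← Nat.mul_pow] using this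

theorem pvV_succ (m : Nat) : pvV (m + 1) = pvV m + padicValNat 5 (m + 1) := by
  haveI := pv_fact5
  unfold pvV
  rw [Nat.factorial_succ, padicValNat.mul (Nat.succ_ne_zero m) (Nat.factorial_ne_zero m)]
  ring

-- pvStrip divides its second argument by 10 exactly (padicValNat 5 i.toNat) times
theorem pvStrip_eq (k : Nat) : ∀ (i q : Int), 0 < i → padicValNat 5 i.toNat = k →
    pvStrip i (q * 10 ^ k) = q := by
  haveI := pv_fact5
  induction k with
  | zero =>
    intro i q hi hk
    rw [pvStrip, dif_neg, pow_zero, mul_one]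
    rintro ⟨h5, -⟩
    rw [PySem.Int.mod_eq_emod_of_pos (by norm_num)] at h5
    have hdn : 5 ∣ i.toNat := by omega
    rw [padicValNat.eq_zero_iff] at hk
    rcases hk with h | h | h
    · norm_num at h
    · omega
    · exact h hdn
  | succ k ih =>
    intro i q hi hk
    have hdn : 5 ∣ i.toNat := by
      by_contra hnd
      rw [padicValNat.eq_zero_of_not_dvd hnd] at hk
      omega
    rw [pvStrip, dif_pos ⟨by rw [PySem.Int.mod_eq_emod_of_pos (by norm_num)]; omega, hi⟩]
    have hfd : PySem.Int.floordiv (q * 10 ^ (k + 1)) 10 = q * 10 ^ k := by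
      rw [PySem.Int.floordiv_eq_ediv_of_pos (by norm_num), pow_succ, ← mul_assoc,
        Int.mul_ediv_cancel _ (by norm_num)]
    rw [hfd, PySem.Int.floordiv_eq_ediv_of_pos (by norm_num)]
    apply ih
    · omega
    · have h1 : (i / 5).toNat = i.toNat / 5 := by omega
      rw [h1, padicValNat.div hdn, hk]
      omega

-- the A-side loop computes m! divided exactly by 10 ^ pvV m
theorem pvAfold (m : Nat) :
    ((PySem.List.pyRange 1 ((m : Int) + 1) 1).foldl
      (fun c i =>
        let c := c * i
        if PySem.Int.mod i 5 = 0 then pvStrip i c else c) 1) * 10 ^ pvV m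
      = (m.factorial : Int) := by
  haveI := pv_fact5
  induction m with
  | zero =>
    rw [PySem.List.pyRange_one_eq_nil (by norm_num)]
    simp [pvV, Nat.factorial]
  | succ m ih =>
    have hsplit : PySem.List.pyRange 1 (((m + 1 : Nat) : Int) + 1) 1
        = PySem.List.pyRange 1 ((m : Int) + 1) 1 ++ [((m : Int) + 1)] := by
      push_cast
      exact PySem.List.pyRange_one_succ_right (by omega)
    rw [hsplit, List.foldl_append]
    set F := (PySem.List.pyRange 1 ((m : Int) + 1) 1).foldl
      (fun c i =>
        let c := c * i
        if PySem.Int.mod i 5 = 0 then pvStrip i c else c) 1 with hF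
    set k := padicValNat 5 (m + 1) with hkdef
    have hfs : ((m + 1).factorial : Int) = F * ((m : Int) + 1) * 10 ^ pvV m := by
      rw [Nat.factorial_succ]
      push_cast
      rw [← ih]
      ring
    have hdvd : (10 : Int) ^ k * 10 ^ pvV m ∣ F * ((m : Int) + 1) * 10 ^ pvV m := by
      rw [← hfs, ← pow_add]
      have := pv_dvd10 (m + 1)
      rw [pvV_succ m] at this
      exact_mod_cast Int.natCast_dvd_natCast.mpr (by rwa [Nat.add_comm (pvV m) k] at this)
    have hq : ∃ q : Int, F * ((m : Int) + 1) = q * 10 ^ k := by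
      have h10 : (10 : Int) ^ pvV m ≠ 0 := by positivity
      rcases (mul_dvd_mul_iff_right h10).mp hdvd with ⟨q, hq⟩
      exact ⟨q, by rw [hq]; ring⟩
    rcases hq with ⟨q, hq⟩
    have htn : ((m : Int) + 1).toNat = m + 1 := by omega
    by_cases h5 : 5 ∣ (m + 1)
    · have hmod : PySem.Int.mod ((m : Int) + 1) 5 = 0 := by
        rw [PySem.Int.mod_eq_emod_of_pos (by norm_num)]
        omega
      simp only [List.foldl_cons, List.foldl_nil]
      rw [if_pos hmod, hq, pvStrip_eq k _ q (by omega) (by rw [htn])]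
      rw [pvV_succ m, ← hkdef, pow_add]
      calc q * (10 ^ pvV m * 10 ^ k) = q * 10 ^ k * 10 ^ pvV m := by ring
        _ = F * ((m : Int) + 1) * 10 ^ pvV m := by rw [hq]
        _ = ((m + 1).factorial : Int) := hfs.symm
    · have hk0 : k = 0 := padicValNat.eq_zero_of_not_dvd h5
      have hmod : ¬ PySem.Int.mod ((m : Int) + 1) 5 = 0 := by
        rw [PySem.Int.mod_eq_emod_of_pos (by norm_num)]
        intro hc
        exact h5 (by omega)
      simp only [List.foldl_cons, List.foldl_nil]
      rw [if_neg hmod, pvV_succ m, ← hkdef, hk0, Nat.add_zero, hfs]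

-- the B-side product loop computes m!
theorem pvBfold (m : Nat) :
    (PySem.List.pyRange 2 ((m : Int) + 1) 1).foldl (fun f i => f * i) 1 = (m.factorial : Int) := by
  induction m with
  | zero => rw [PySem.List.pyRange_one_eq_nil (by norm_num)]; simp [Nat.factorial]
  | succ m ih =>
    rcases Nat.eq_zero_or_pos m with rfl | hm
    · rw [PySem.List.pyRange_one_eq_nil (by norm_num)]; simp [Nat.factorial]
    · have hsplit : PySem.List.pyRange 2 (((m + 1 : Nat) : Int) + 1) 1
          = PySem.List.pyRange 2 ((m : Int) + 1) 1 ++ [((m : Int) + 1)] := by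
        push_cast
        exact PySem.List.pyRange_one_succ_right (by omega)
      rw [hsplit, List.foldl_append, ih, Nat.factorial_succ]
      simp only [List.foldl_cons, List.foldl_nil]
      push_cast
      ring

-- the B-side while loop computes the tail of Legendre's sum from exponent t on
theorem pvZaux (m b : Nat) (hm : m ≠ 0) (hb : Nat.log 5 m < b) :
    ∀ (d t : Nat) (z : Int), b - t = d → 1 ≤ t →
    pvZLoop (m : Int) ((5 : Int) ^ t) z = z + ((∑ i ∈ Finset.Ico t b, m / 5 ^ i : Nat) : Int) := by
  intro d
  induction d with
  | zero =>
    intro t z hd ht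
    have hgt : m < 5 ^ t := by
      by_contra hle
      have := (Nat.le_log_iff_pow_le (b := 5) (by norm_num) hm).mpr (Nat.le_of_not_lt hle)
      omega
    rw [pvZLoop, dif_neg (by
      rintro ⟨h1, -⟩
      have : (5 : Nat) ^ t ≤ m := by exact_mod_cast h1
      omega)]
    have hz : (∑ i ∈ Finset.Ico t b, m / 5 ^ i) = 0 := by
      apply Finset.sum_eq_zero
      intro i hi
      have : 5 ^ t ≤ 5 ^ i := Nat.pow_le_pow_right (by norm_num) (Finset.mem_Ico.mp hi).1
      exact Nat.div_eq_of_lt (by omega)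
    rw [hz]
    simp
  | succ d ih =>
    intro t z hd ht
    by_cases hle : 5 ^ t ≤ m
    · have htb : t < b := by
        have := (Nat.le_log_iff_pow_le (b := 5) (by norm_num) hm).mpr hle
        omega
      rw [pvZLoop, dif_pos ⟨by exact_mod_cast hle, by positivity⟩]
      have hp5 : (5 : Int) ^ t * 5 = (5 : Int) ^ (t + 1) := by ring
      have hfd : PySem.Int.floordiv (m : Int) ((5 : Int) ^ t) = ((m / 5 ^ t : Nat) : Int) := by
        have : ((5 : Int) ^ t) = ((5 ^ t : Nat) : Int) := by push_cast; ring
        rw [this]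
        exact PySem.Int.floordiv_natCast m (5 ^ t)
      rw [hp5, hfd, ih (t + 1) _ (by omega) (by omega)]
      rw [Finset.sum_eq_sum_Ico_succ_bot htb]
      push_cast
      ring
    · rw [pvZLoop, dif_neg (by
        rintro ⟨h1, -⟩
        exact hle (by exact_mod_cast h1))]
      have hz : (∑ i ∈ Finset.Ico t b, m / 5 ^ i) = 0 := by
        apply Finset.sum_eq_zero
        intro i hi
        have h1 : 5 ^ t ≤ 5 ^ i := Nat.pow_le_pow_right (by norm_num) (Finset.mem_Ico.mp hi).1
        exact Nat.div_eq_of_lt (by omega)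
      rw [hz]
      simp

-- the B-side while loop computes pvV m
theorem pvZ (m : Nat) : pvZLoop (m : Int) 5 0 = (pvV m : Int) := by
  haveI := pv_fact5
  rcases Nat.eq_zero_or_pos m with rfl | hm
  · rw [pvZLoop, dif_neg (by norm_num)]
    simp [pvV, Nat.factorial]
  · have h5 : (5 : Int) = (5 : Int) ^ 1 := by ring
    rw [h5, pvZaux m (Nat.log 5 m + 1) (by omega) (Nat.lt_succ_self _) (Nat.log 5 m) 1 0 (by omega) (by omega)]
    rw [pvV, padicValNat_factorial (Nat.lt_succ_self _)]
    simp

theorem main_lemma : ∀ (n : Int), alternative n = alternative_alt n := by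
  intro n
  simp only [alternative, alternative_alt]
  by_cases hn : n ≤ 0
  · rw [PySem.List.pyRange_one_eq_nil (by omega), PySem.List.pyRange_one_eq_nil (by omega),
      pvZLoop, dif_neg (by omega)]
    norm_num [PySem.Int.floordiv_eq_ediv_of_pos, PySem.Int.mod_eq_emod_of_pos]
  · obtain ⟨m, rfl⟩ : ∃ m : Nat, n = (m : Int) := ⟨n.toNat, (Int.toNat_of_nonneg (by omega)).symm⟩
    rw [pvBfold, pvZ, Int.toNat_natCast, ← pvAfold m,
      PySem.Int.floordiv_eq_ediv_of_pos (by positivity),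
      Int.mul_ediv_cancel _ (by positivity)]
    norm_num

-- ===== VERDICT (by name: the statement is the Claim_ definition above) =====
theorem alternative_spec : Claim_equal_alternative := by
  intro n _
  unfold Spec_alternative
  exact main_lemma n
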